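-- pv_equiv track=rewrite | github.com/satojkovic/algorithms | kickstart/2021/l_shape.py | get_col_count
-- ===== SOURCE A (Python) =====
-- def get_col_count(row_seg, col_seg, R, C):
--     count = 0
--     row = 2
--     for col in range(4, C + 1, 2):
--         if row_seg < row or col_seg < col:
--             break
--         if row_seg >= row and col_seg >= col:
--             count += 1
--         row += 1
--     return count
-- ===== SOURCE B (Python) =====
-- def get_col_count(row_seg, col_seg, R, C):
--     # Closed form: the loop counts i = 0,1,... while 2+i <= row_seg and 4+2*i <= col_seg,
--     # over at most (C-2)//2 iterations of range(4, C+1, 2).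
--     return max(0, min(row_seg - 1, (col_seg - 2) // 2, (C - 2) // 2))
-- ===== Notes on version B (the rewrite author's own statement) =====
-- stated objective: faster
-- what changed: Replaced the counting loop over range(4, C+1, 2) with a closed-form expression max(0, min(row_seg-1, (col_seg-2)//2, (C-2)//2)).
import Mathlib
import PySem

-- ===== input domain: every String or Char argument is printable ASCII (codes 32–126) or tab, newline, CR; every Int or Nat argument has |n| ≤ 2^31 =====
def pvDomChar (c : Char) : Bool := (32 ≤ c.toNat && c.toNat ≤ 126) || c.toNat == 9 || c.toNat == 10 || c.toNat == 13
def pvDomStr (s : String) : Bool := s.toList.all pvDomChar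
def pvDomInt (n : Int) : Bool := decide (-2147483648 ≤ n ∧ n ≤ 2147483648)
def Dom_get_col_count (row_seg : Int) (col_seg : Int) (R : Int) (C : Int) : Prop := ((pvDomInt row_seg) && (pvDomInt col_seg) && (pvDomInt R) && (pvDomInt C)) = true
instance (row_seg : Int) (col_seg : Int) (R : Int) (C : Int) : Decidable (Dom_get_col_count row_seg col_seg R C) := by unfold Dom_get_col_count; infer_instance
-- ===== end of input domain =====

-- B replaces A's counting loop over range(4, C+1, 2) with a closed-form max/min expression.


-- ===== PORT A =====
-- 'for col in range(4, C+1, 2)' with its early 'break', iterated directly on col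
-- (col < stop, step 2 — exactly range's iteration rule); state = (row, count)
def pvLoopA (row_seg : Int) (col_seg : Int) (stop : Int) (col : Int) (row : Int) (count : Int) : Int :=
  if _h : col < stop then
    if row_seg < row ∨ col_seg < col then count
    else
      pvLoopA row_seg col_seg stop (col + 2) (row + 1)
        (if row_seg ≥ row ∧ col_seg ≥ col then count + 1 else count)
  else count
termination_by (stop - col).toNat
decreasing_by omega

def get_col_count (row_seg : Int) (col_seg : Int) (R : Int) (C : Int) : Int :=
  pvLoopA row_seg col_seg (C + 1) 4 2 0

-- ===== PORT B =====
def get_col_count_alt (row_seg : Int) (col_seg : Int) (R : Int) (C : Int) : Int :=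
  max 0 (min (min (row_seg - 1) (PySem.Int.floordiv (col_seg - 2) 2)) (PySem.Int.floordiv (C - 2) 2))

-- ===== PRECONDITION & SPEC =====
def Spec_get_col_count (row_seg : Int) (col_seg : Int) (R : Int) (C : Int) (out : Int) : Prop := out = get_col_count_alt row_seg col_seg R C
instance (row_seg : Int) (col_seg : Int) (R : Int) (C : Int) (out : Int) : Decidable (Spec_get_col_count row_seg col_seg R C out) := by unfold Spec_get_col_count; infer_instance

-- ===== CLAIM (what is proved, stated in full; the proofs are below) =====
def Claim_equal_get_col_count : Prop := ∀ (row_seg : Int) (col_seg : Int) (R : Int) (C : Int), Dom_get_col_count row_seg col_seg R C → Spec_get_col_count row_seg col_seg R C (get_col_count row_seg col_seg R C)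

-- ===== LEMMAS AND PROOFS =====

-- loop invariant: after j iterations col = 4 + 2*j, row = 2 + j; n bounds the remaining iterations
theorem pvLoopA_closed (rs cs C : Int) :
    ∀ (n : Nat) (j c : Int), (C + 1 - (4 + 2 * j)).toNat ≤ 2 * n →
      pvLoopA rs cs (C + 1) (4 + 2 * j) (2 + j) c
        = c + max 0 (min (min (rs - 1 - j)
            (PySem.Int.floordiv (cs - 2) 2 - j)) (PySem.Int.floordiv (C - 2) 2 - j)) := by
  intro n
  induction n with
  | zero =>
    intro j c hn
    rw [pvLoopA]
    rw [dif_neg (by omega)]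
    have : PySem.Int.floordiv (C - 2) 2 < j + 1 :=
      (PySem.Int.floordiv_lt_iff_lt_mul (by omega)).2 (by omega)
    omega
  | succ n ih =>
    intro j c hn
    rw [pvLoopA]
    by_cases hs : 4 + 2 * j < C + 1
    · rw [dif_pos hs]
      have hCfd : j + 1 ≤ PySem.Int.floordiv (C - 2) 2 :=
        (PySem.Int.le_floordiv_iff_mul_le (by omega)).2 (by omega)
      by_cases h : rs < 2 + j ∨ cs < 4 + 2 * j
      · rw [if_pos h]
        have hfd : cs < 4 + 2 * j → PySem.Int.floordiv (cs - 2) 2 - j ≤ 0 := by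
          intro hc
          have : PySem.Int.floordiv (cs - 2) 2 < j + 1 :=
            (PySem.Int.floordiv_lt_iff_lt_mul (by omega)).2 (by omega)
          omega
        rcases h with h | h
        · omega
        · have := hfd h; omega
      · rw [if_neg h]
        push Not at h
        obtain ⟨h1, h2⟩ := h
        rw [if_pos ⟨h1, by omega⟩]
        have e1 : 4 + 2 * j + 2 = 4 + 2 * (j + 1) := by ring
        have e2 : 2 + j + 1 = 2 + (j + 1) := by ring
        rw [e1, e2, ih (j + 1) (c + 1) (by omega)]
        have hfd : j + 1 ≤ PySem.Int.floordiv (cs - 2) 2 :=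
          (PySem.Int.le_floordiv_iff_mul_le (by omega)).2 (by omega)
        omega
    · rw [dif_neg hs]
      have : PySem.Int.floordiv (C - 2) 2 < j + 1 :=
        (PySem.Int.floordiv_lt_iff_lt_mul (by omega)).2 (by omega)
      omega

theorem get_col_count_spec : Claim_equal_get_col_count := by
  intro row_seg col_seg R C _
  unfold Spec_get_col_count get_col_count get_col_count_alt
  have key := pvLoopA_closed row_seg col_seg C (C + 1 - 4).toNat 0 0 (by omega)
  simp only [mul_zero, add_zero, sub_zero, zero_add] at key
  rw [key]
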